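-- pv_equiv track=rewrite | github.com/DariuszNewecki/CORE | src/shared/ai/prompt_model.py | _resolve_layers_for_log
-- ===== SOURCE A (Python) =====
-- def _resolve_layers_for_log(target_files: list[str]) -> set[str]:
--     """Cheap layer resolution for debug logging only."""
--     _LAYER_MAP = {
--         "src/body/": "body",
--         "src/will/": "will",
--         "src/mind/": "mind",
--         "src/shared/": "shared",
--         "src/cli/": "cli",
--     }
--     layers: set[str] = set()
--     for f in target_files:
--         f_norm = f.replace("\\", "/")
--         for prefix, layer in _LAYER_MAP.items():
--             if f_norm.startswith(prefix):
--                 layers.add(layer)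
--                 break
--         else:
--             layers.add("shared")
--     return layers
-- ===== SOURCE B (Python) =====
-- _LAYERS = {"body", "will", "mind", "shared", "cli"}
--
--
-- def _resolve_layers_for_log(target_files: list[str]) -> set[str]:
--     """Cheap layer resolution for debug logging only."""
--     layers: set[str] = set()
--     for f in target_files:
--         norm = f.replace("\\", "/")
--         layer = "shared"
--         if norm.startswith("src/"):
--             seg, sep, _tail = norm[4:].partition("/")
--             if sep and seg in _LAYERS:
--                 layer = seg
--         layers.add(layer)
--     return layers
-- ===== Notes on version B (the rewrite author's own statement) =====
-- stated objective: faster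
-- what changed: Replaces A's inner scan over five 'src/<layer>/' prefix tests per file by a single startswith('src/') check plus a partition of the remainder at the first '/' and one set-membership lookup of the extracted segment.
import Mathlib
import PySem

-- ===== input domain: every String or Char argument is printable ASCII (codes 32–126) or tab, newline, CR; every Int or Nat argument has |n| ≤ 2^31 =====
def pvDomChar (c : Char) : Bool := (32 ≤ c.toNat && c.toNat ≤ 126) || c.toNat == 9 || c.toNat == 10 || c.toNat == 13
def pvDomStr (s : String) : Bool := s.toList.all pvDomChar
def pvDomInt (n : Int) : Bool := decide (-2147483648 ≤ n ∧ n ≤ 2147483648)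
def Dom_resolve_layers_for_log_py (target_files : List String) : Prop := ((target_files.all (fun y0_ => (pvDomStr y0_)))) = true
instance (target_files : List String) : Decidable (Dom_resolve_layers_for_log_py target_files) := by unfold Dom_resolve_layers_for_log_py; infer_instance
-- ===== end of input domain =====

-- B replaces A's inner scan over five "src/<layer>/" prefixes by one startswith("src/")
-- test plus a partition of the remainder at the first '/' and a set lookup (measured faster).


-- ===== PORT A =====
-- _LAYER_MAP, a dict literal with distinct keys, in insertion order
def pvLayerMapA : List (String × String) :=
  [("src/body/", "body"), ("src/will/", "will"), ("src/mind/", "mind"),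
   ("src/shared/", "shared"), ("src/cli/", "cli")]

-- the inner 'for prefix, layer in _LAYER_MAP.items(): … break / else: shared'
def pvPickA : List (String × String) → String → String
  | [], _ => "shared"
  | (pre, layer) :: rest, fn =>
      if PySem.Str.startswith fn pre then layer else pvPickA rest fn

def resolve_layers_for_log_py (target_files : List String) : List String :=
  target_files.foldl
    (fun layers f => PySem.Set.add layers (pvPickA pvLayerMapA (PySem.Str.replace f "\\" "/")))
    (PySem.Set.ofList [])

-- ===== PORT B =====
def pvLayersB : List String := ["body", "will", "mind", "shared", "cli"]

-- hand port of str.partition for the single-character separator "/":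
-- exact — returns (text before the first '/', whether a '/' occurred, text after it)
def pvPartSlash : List Char → List Char × Bool × List Char
  | [] => ([], false, [])
  | c :: cs =>
      if c = '/' then ([], true, cs)
      else
        let r := pvPartSlash cs
        (c :: r.1, r.2.1, r.2.2)

def pvClassifyB (norm : String) : String :=
  if PySem.Str.startswith norm "src/" then
    let r := pvPartSlash (norm.toList.drop 4)   -- norm[4:] (nonnegative slice = drop)
    let seg := String.ofList r.1
    if r.2.1 && pvLayersB.contains seg then seg else "shared"
  else "shared"

def resolve_layers_for_log_py_alt (target_files : List String) : List String :=
  target_files.foldl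
    (fun layers f => PySem.Set.add layers (pvClassifyB (PySem.Str.replace f "\\" "/")))
    (PySem.Set.ofList [])

-- ===== PRECONDITION & SPEC =====
def Spec_resolve_layers_for_log_py (target_files : List String) (out : List String) : Prop := out = resolve_layers_for_log_py_alt target_files
instance (target_files : List String) (out : List String) : Decidable (Spec_resolve_layers_for_log_py target_files out) := by unfold Spec_resolve_layers_for_log_py; infer_instance

-- ===== CLAIM (what is proved, stated in full; the proofs are below) =====
def Claim_equal_resolve_layers_for_log_py : Prop := ∀ (target_files : List String), Dom_resolve_layers_for_log_py target_files → Spec_resolve_layers_for_log_py target_files (resolve_layers_for_log_py target_files)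

-- ===== LEMMAS AND PROOFS =====

-- str.partition at the first '/' characterises startswith (w ++ "/") for a slash-free w
theorem pv_startswith_part (cs : List Char) : ∀ (w : List Char), w.contains '/' = false →
    PySem.Chars.startswith cs (w ++ ['/'])
      = ((pvPartSlash cs).1 == w && (pvPartSlash cs).2.1) := by
  induction cs with
  | nil =>
      intro w _
      cases w <;> simp [PySem.Chars.startswith, pvPartSlash]
  | cons c cs ih =>
      intro w hw
      by_cases hc : c = '/'
      · subst hc
        cases w with
        | nil => simp [PySem.Chars.startswith, pvPartSlash, List.isPrefixOf]
        | cons w0 w' =>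
            have h0 : (w0 == '/') = false := by
              simp only [List.contains_cons, Bool.or_eq_false_iff] at hw
              simpa [BEq.comm] using hw.1
            simp [PySem.Chars.startswith, pvPartSlash, List.isPrefixOf, h0]
      · cases w with
        | nil =>
            have h2 : ('/' == c) = false := by simpa using fun h => hc h.symm
            simp only [PySem.Chars.startswith, pvPartSlash, if_neg hc]
            simp [List.isPrefixOf, h2]
        | cons w0 w' =>
            have hw' : w'.contains '/' = false := by
              simp only [List.contains_cons, Bool.or_eq_false_iff] at hw
              exact hw.2
            have := ih w' hw'
            simp only [PySem.Chars.startswith] at this ⊢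
            by_cases h0 : w0 = c
            · subst h0
              simp [pvPartSlash, hc, this]
            · have hA : (w0 == c) = false := by simpa using h0
              have hB : (c == w0) = false := by simpa using (fun h => h0 h.symm : ¬ c = w0)
              simp [pvPartSlash, List.isPrefixOf, hc, hA, hB]

theorem pv_startswith_append (p s t : List Char) :
    PySem.Chars.startswith (p ++ s) (p ++ t) = PySem.Chars.startswith s t := by
  rw [Bool.eq_iff_iff]
  simp [PySem.Chars.startswith_iff, List.prefix_append_right_inj]

theorem pv_startswith_trans_false (cs p q : List Char)
    (h : PySem.Chars.startswith cs p = false) :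
    PySem.Chars.startswith cs (p ++ q) = false := by
  rw [Bool.eq_false_iff] at h ⊢
  intro hpq
  exact h ((PySem.Chars.startswith_iff _ _).2
    (((List.prefix_append p q).trans ((PySem.Chars.startswith_iff _ _).1 hpq))))

theorem pv_ofList_eq_iff (seg : List Char) (t : String) :
    (String.ofList seg == t) = (seg == t.toList) := by
  rw [Bool.eq_iff_iff]
  constructor
  · intro h
    have h2 : String.ofList seg = t := by simpa using h
    simp [← h2]
  · intro h
    have h2 : seg = t.toList := by simpa using h
    simp [h2]

-- per-file equality of the two classifications
theorem pv_classify_eq (s : String) : pvPickA pvLayerMapA s = pvClassifyB s := by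
  unfold pvClassifyB
  simp only [pvPickA, pvLayerMapA, PySem.Str.startswith]
  by_cases h : PySem.Chars.startswith s.toList "src/".toList
  · obtain ⟨rest, hrest⟩ := (PySem.Chars.startswith_iff _ _).1 h
    have hcs : s.toList = "src/".toList ++ rest := hrest.symm
    have hdrop : s.toList.drop 4 = rest := by
      rw [hcs]
      exact List.drop_left (l₁ := "src/".toList) (l₂ := rest)
    rw [h, if_pos rfl]
    have hb : PySem.Chars.startswith s.toList "src/body/".toList
        = ((pvPartSlash rest).1 == (['b', 'o', 'd', 'y'] : List Char) && (pvPartSlash rest).2.1) := by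
      rw [hcs, show ("src/body/".toList = "src/".toList ++ ((['b', 'o', 'd', 'y'] : List Char) ++ ['/'])) from rfl,
        pv_startswith_append, pv_startswith_part rest ['b', 'o', 'd', 'y'] (by decide)]
    have hwl : PySem.Chars.startswith s.toList "src/will/".toList
        = ((pvPartSlash rest).1 == (['w', 'i', 'l', 'l'] : List Char) && (pvPartSlash rest).2.1) := by
      rw [hcs, show ("src/will/".toList = "src/".toList ++ ((['w', 'i', 'l', 'l'] : List Char) ++ ['/'])) from rfl,
        pv_startswith_append, pv_startswith_part rest ['w', 'i', 'l', 'l'] (by decide)]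
    have hm : PySem.Chars.startswith s.toList "src/mind/".toList
        = ((pvPartSlash rest).1 == (['m', 'i', 'n', 'd'] : List Char) && (pvPartSlash rest).2.1) := by
      rw [hcs, show ("src/mind/".toList = "src/".toList ++ ((['m', 'i', 'n', 'd'] : List Char) ++ ['/'])) from rfl,
        pv_startswith_append, pv_startswith_part rest ['m', 'i', 'n', 'd'] (by decide)]
    have hs : PySem.Chars.startswith s.toList "src/shared/".toList
        = ((pvPartSlash rest).1 == (['s', 'h', 'a', 'r', 'e', 'd'] : List Char) && (pvPartSlash rest).2.1) := by
      rw [hcs, show ("src/shared/".toList = "src/".toList ++ ((['s', 'h', 'a', 'r', 'e', 'd'] : List Char) ++ ['/'])) from rfl,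
        pv_startswith_append, pv_startswith_part rest ['s', 'h', 'a', 'r', 'e', 'd'] (by decide)]
    have hc : PySem.Chars.startswith s.toList "src/cli/".toList
        = ((pvPartSlash rest).1 == (['c', 'l', 'i'] : List Char) && (pvPartSlash rest).2.1) := by
      rw [hcs, show ("src/cli/".toList = "src/".toList ++ ((['c', 'l', 'i'] : List Char) ++ ['/'])) from rfl,
        pv_startswith_append, pv_startswith_part rest ['c', 'l', 'i'] (by decide)]
    rw [hdrop]
    rcases hp : pvPartSlash rest with ⟨seg, b, tail⟩
    rw [hp] at hb hwl hm hs hc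
    rw [hb, hwl, hm, hs, hc]
    simp only [pvLayersB, List.contains_cons, List.contains_nil]
    cases b with
    | false => simp
    | true =>
        simp only [Bool.and_true, Bool.true_and, Bool.or_false]
        simp only [pv_ofList_eq_iff]
        by_cases e1 : seg = (['b', 'o', 'd', 'y'] : List Char)
        · simp [e1]
        by_cases e2 : seg = (['w', 'i', 'l', 'l'] : List Char)
        · simp [e2]
        by_cases e3 : seg = (['m', 'i', 'n', 'd'] : List Char)
        · simp [e3]
        by_cases e4 : seg = (['s', 'h', 'a', 'r', 'e', 'd'] : List Char)
        · simp [e4]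
        by_cases e5 : seg = (['c', 'l', 'i'] : List Char)
        · simp [e5]
        · simp [e1, e2, e3, e4, e5]
  · have h' : PySem.Chars.startswith s.toList "src/".toList = false := by
      simpa using h
    rw [h']
    have hb : PySem.Chars.startswith s.toList "src/body/".toList = false := by
      rw [show ("src/body/".toList = "src/".toList ++ "body/".toList) from rfl]
      exact pv_startswith_trans_false s.toList "src/".toList "body/".toList h'
    have hwl : PySem.Chars.startswith s.toList "src/will/".toList = false := by
      rw [show ("src/will/".toList = "src/".toList ++ "will/".toList) from rfl]
      exact pv_startswith_trans_false s.toList "src/".toList "will/".toList h'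
    have hm : PySem.Chars.startswith s.toList "src/mind/".toList = false := by
      rw [show ("src/mind/".toList = "src/".toList ++ "mind/".toList) from rfl]
      exact pv_startswith_trans_false s.toList "src/".toList "mind/".toList h'
    have hs : PySem.Chars.startswith s.toList "src/shared/".toList = false := by
      rw [show ("src/shared/".toList = "src/".toList ++ "shared/".toList) from rfl]
      exact pv_startswith_trans_false s.toList "src/".toList "shared/".toList h'
    have hc : PySem.Chars.startswith s.toList "src/cli/".toList = false := by
      rw [show ("src/cli/".toList = "src/".toList ++ "cli/".toList) from rfl]
      exact pv_startswith_trans_false s.toList "src/".toList "cli/".toList h'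
    rw [hb, hwl, hm, hs, hc]
    simp

-- ===== VERDICT (by name: the statement is the Claim_ definition above) =====
theorem resolve_layers_for_log_py_spec : Claim_equal_resolve_layers_for_log_py := by
  intro target_files _
  unfold Spec_resolve_layers_for_log_py
  unfold resolve_layers_for_log_py resolve_layers_for_log_py_alt
  have : (fun (layers : List String) f =>
        PySem.Set.add layers (pvPickA pvLayerMapA (PySem.Str.replace f "\\" "/")))
      = (fun (layers : List String) f =>
        PySem.Set.add layers (pvClassifyB (PySem.Str.replace f "\\" "/"))) := by
    funext layers f
    rw [pv_classify_eq]
  rw [this]
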